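-- pv_equiv track=rewrite | github.com/demisto/content | parinx/parser.py | split_docstring
-- ===== SOURCE A (Python) =====
-- from itertools import takewhile
--
-- def split_docstring(docstring):
--     """
--     Separates the method's description and paramter's
--
--     :return: Return description string and list of fields strings
--     """
--     docstring_list = [line.strip() for line in docstring.splitlines()]
--     description_list = list(
--         takewhile(lambda line: not (line.startswith(':') or
--                                     line.startswith('@inherit')), docstring_list))
--     description = ' '.join(description_list).strip()
--     first_field_line_number = len(description_list)
--
--     fields = []
--     if first_field_line_number >= len(docstring_list):
--         return description, fields  # only description, without any field
--     last_field_lines = [docstring_list[first_field_line_number]]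
--
--     for line in docstring_list[first_field_line_number + 1:]:
--         if line.strip().startswith(':') or line.strip().startswith('@inherit'):
--             fields.append(' '.join(last_field_lines))
--             last_field_lines = [line]
--         else:
--             last_field_lines.append(line)
--
--     fields.append(' '.join(last_field_lines))
--     return description, fields
-- ===== SOURCE B (Python) =====
-- def split_docstring(docstring):
--     def is_marker(line):
--         return line.startswith(':') or line.startswith('@inherit')
--
--     description_lines = []
--     fields = []
--     current = None
--     for raw in docstring.splitlines():
--         line = raw.strip()
--         if current is None:
--             if is_marker(line):
--                 current = [line]
--             else:
--                 description_lines.append(line)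
--         elif is_marker(line):
--             fields.append(' '.join(current))
--             current = [line]
--         else:
--             current.append(line)
--     if current is not None:
--         fields.append(' '.join(current))
--     return ' '.join(description_lines).strip(), fields
-- ===== Notes on version B (the rewrite author's own statement) =====
-- stated objective: simpler
-- what changed: Replaces the takewhile-prefix + index-slice + second loop with a single linear pass over the lines maintaining a mode flag (description vs. current field buffer), stripping each line once as it is read.
import Mathlib
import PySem

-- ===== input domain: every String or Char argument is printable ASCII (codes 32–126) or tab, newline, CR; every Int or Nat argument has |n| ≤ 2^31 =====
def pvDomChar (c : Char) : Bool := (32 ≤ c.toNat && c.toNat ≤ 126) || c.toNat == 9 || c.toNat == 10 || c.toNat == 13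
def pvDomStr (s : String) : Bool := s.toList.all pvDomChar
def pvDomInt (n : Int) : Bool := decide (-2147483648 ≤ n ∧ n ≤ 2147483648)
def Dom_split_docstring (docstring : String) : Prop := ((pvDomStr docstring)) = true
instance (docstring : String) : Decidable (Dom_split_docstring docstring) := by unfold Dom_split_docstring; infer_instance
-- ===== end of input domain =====

-- B replaces A's takewhile-prefix + index slice + second loop by a single pass with a mode flag; objective: simpler.

-- ===== PORT A =====
def split_docstring (docstring : String) : String × List String :=
  let docstring_list := (PySem.Str.splitlines docstring).map PySem.Str.strip
  let description_list := docstring_list.takeWhile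
      (fun line => !(PySem.Str.startswith line ":" || PySem.Str.startswith line "@inherit"))
  let description := PySem.Str.strip (PySem.Str.join " " description_list)
  -- 'if first_field_line_number >= len(...): return', the index [n] and the slice [n+1:]
  -- are the nil/cons match on docstring_list.drop n (n = first_field_line_number)
  match docstring_list.drop description_list.length with
  | [] => (description, [])
  | first :: rest =>
      let st := rest.foldl
        (fun (st : List String × List String) line =>
          if PySem.Str.startswith (PySem.Str.strip line) ":" ||
             PySem.Str.startswith (PySem.Str.strip line) "@inherit"
          then (st.1 ++ [PySem.Str.join " " st.2], [line])
          else (st.1, st.2 ++ [line]))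
        ([], [first])
      (description, st.1 ++ [PySem.Str.join " " st.2])

-- ===== PORT B =====
-- Source B's is_marker helper
def altMark (line : String) : Bool :=
  PySem.Str.startswith line ":" || PySem.Str.startswith line "@inherit"

-- Source B's loop body, applied to the already-stripped line ('line = raw.strip()' is its first statement);
-- state = (description_lines, fields, current)
def altStepCore (st : List String × List String × Option (List String)) (line : String) :
    List String × List String × Option (List String) :=
  match st with
  | (desc, fields, none) =>
      if altMark line then (desc, fields, some [line]) else (desc ++ [line], fields, none)
  | (desc, fields, some cur) =>
      if altMark line then (desc, fields ++ [PySem.Str.join " " cur], some [line])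
      else (desc, fields, some (cur ++ [line]))

def split_docstring_alt (docstring : String) : String × List String :=
  let st := (PySem.Str.splitlines docstring).foldl
      (fun st raw => altStepCore st (PySem.Str.strip raw)) ([], [], none)
  let fields := match st.2.2 with
    | none => st.2.1
    | some cur => st.2.1 ++ [PySem.Str.join " " cur]
  (PySem.Str.strip (PySem.Str.join " " st.1), fields)

-- ===== PRECONDITION & SPEC =====
def Spec_split_docstring (docstring : String) (out : String × List String) : Prop := out = split_docstring_alt docstring
instance (docstring : String) (out : String × List String) : Decidable (Spec_split_docstring docstring out) := by unfold Spec_split_docstring; infer_instance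

-- ===== CLAIM (what is proved, stated in full; the proofs are below) =====
def Claim_equal_split_docstring : Prop := ∀ (docstring : String), Dom_split_docstring docstring → Spec_split_docstring docstring (split_docstring docstring)

-- ===== LEMMAS AND PROOFS =====

theorem pv_dropWhile_prefix {p : Char → Bool} {t u : List Char}
    (ht : t.dropWhile p = t) (hu : u <+: t) : u.dropWhile p = u := by
  cases u with
  | nil => rfl
  | cons a u' =>
    cases t with
    | nil => simp at hu
    | cons b t' =>
      obtain ⟨w, hw⟩ := hu
      have hab : a = b := by injection hw
      subst hab
      have hb : p a = false := by
        by_contra h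
        rw [List.dropWhile_cons_of_pos (by simpa using h)] at ht
        have h1 := congrArg List.length ht
        have h2 := List.length_dropWhile_le p t'
        simp at h1
        omega
      simp [hb]

theorem pv_chars_strip_idem (cs : List Char) :
    PySem.Chars.strip (PySem.Chars.strip cs) = PySem.Chars.strip cs := by
  unfold PySem.Chars.strip PySem.Chars.rstrip PySem.Chars.lstrip
  set p := PySem.Chars.isspace
  set t := cs.dropWhile p with ht
  have htfix : t.dropWhile p = t := by
    rw [ht, List.dropWhile_idempotent]
  have hpre : (t.reverse.dropWhile p).reverse <+: t := by
    have h := (List.dropWhile_suffix (l := t.reverse) p).reverse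
    simpa using h
  rw [pv_dropWhile_prefix htfix hpre]
  rw [List.reverse_reverse, List.dropWhile_idempotent]

theorem pv_strip_idem (s : String) : PySem.Str.strip (PySem.Str.strip s) = PySem.Str.strip s := by
  unfold PySem.Str.strip
  rw [String.toList_ofList, pv_chars_strip_idem]

-- one step of A's field loop
def aStep (st : List String × List String) (line : String) : List String × List String :=
  if PySem.Str.startswith (PySem.Str.strip line) ":" ||
     PySem.Str.startswith (PySem.Str.strip line) "@inherit"
  then (st.1 ++ [PySem.Str.join " " st.2], [line])
  else (st.1, st.2 ++ [line])

theorem pv_aStep_eq (st : List String × List String) (line : String) :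
    aStep st line =
      if altMark (PySem.Str.strip line) then (st.1 ++ [PySem.Str.join " " st.2], [line])
      else (st.1, st.2 ++ [line]) := rfl

-- in field mode, B's fold simulates A's loop (lines already fixed by strip)
theorem pv_phase2 (rest : List String) (hfix : ∀ x ∈ rest, PySem.Str.strip x = x) :
    ∀ fields cur (desc : List String),
      rest.foldl altStepCore (desc, fields, some cur) =
        (desc, (rest.foldl aStep (fields, cur)).1, some (rest.foldl aStep (fields, cur)).2) := by
  induction rest with
  | nil => intro fields cur desc; rfl
  | cons x rest ih =>
    intro fields cur desc
    have hx : PySem.Str.strip x = x := hfix x (by simp)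
    have hfix' : ∀ y ∈ rest, PySem.Str.strip y = y := fun y hy => hfix y (by simp [hy])
    simp only [List.foldl_cons, altStepCore, pv_aStep_eq, hx]
    by_cases h : altMark x = true
    · simp only [h, if_true, ih hfix']
    · simp only [Bool.not_eq_true] at h
      simp only [h, Bool.false_eq_true, if_false, ih hfix']

-- in description mode, B's fold accumulates the takeWhile prefix, then enters field mode
theorem pv_phase1 (L : List String) :
    ∀ desc : List String, L.foldl altStepCore (desc, [], none) =
      match L.dropWhile (fun l => !altMark l) with
      | [] => (desc ++ L.takeWhile (fun l => !altMark l), ([] : List String), (none : Option (List String)))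
      | first :: rest =>
          rest.foldl altStepCore (desc ++ L.takeWhile (fun l => !altMark l), [], some [first]) := by
  induction L with
  | nil => intro desc; simp
  | cons x L ih =>
    intro desc
    by_cases h : altMark x = true
    · simp only [List.foldl_cons, altStepCore, h, if_true, List.dropWhile_cons,
        List.takeWhile_cons, Bool.not_true, Bool.false_eq_true, if_false]
      simp
    · simp only [Bool.not_eq_true] at h
      simp only [List.foldl_cons, altStepCore, h, Bool.false_eq_true, if_false,
        List.dropWhile_cons, List.takeWhile_cons, Bool.not_false, if_true]
      rw [ih (desc ++ [x])]
      rcases hd : L.dropWhile (fun l => !altMark l) with _ | ⟨first, rest⟩ <;> simp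

theorem pv_drop_takeWhile {α : Type} (p : α → Bool) (l : List α) :
    l.drop (l.takeWhile p).length = l.dropWhile p := by
  induction l with
  | nil => rfl
  | cons a l ih => by_cases h : p a <;> simp [h, ih]

-- ===== VERDICT (by name: the statement is the Claim_ definition above) =====
theorem split_docstring_spec : Claim_equal_split_docstring := by
  intro s _
  unfold Spec_split_docstring split_docstring split_docstring_alt
  have hmapfold :
      (PySem.Str.splitlines s).foldl (fun st raw => altStepCore st (PySem.Str.strip raw)) ([], [], none)
        = ((PySem.Str.splitlines s).map PySem.Str.strip).foldl altStepCore ([], [], none) := by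
    rw [List.foldl_map]
  set L := (PySem.Str.splitlines s).map PySem.Str.strip with hL
  have hfixL : ∀ x ∈ L, PySem.Str.strip x = x := by
    intro x hx
    rw [hL] at hx
    obtain ⟨r, -, rfl⟩ := List.mem_map.mp hx
    exact pv_strip_idem r
  have hq : (fun line => !(PySem.Str.startswith line ":" || PySem.Str.startswith line "@inherit"))
      = (fun l => !altMark l) := rfl
  have hdrop : L.drop (L.takeWhile (fun l => !altMark l)).length = L.dropWhile (fun l => !altMark l) :=
    pv_drop_takeWhile _ L
  simp only [hmapfold, hq, hdrop, pv_phase1 L []]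
  rcases hd : L.dropWhile (fun l => !altMark l) with _ | ⟨first, rest⟩
  · rfl
  · dsimp only
    have hrest : ∀ x ∈ rest, PySem.Str.strip x = x := by
      intro x hx
      apply hfixL
      have hsub : first :: rest <:+ L := hd ▸ List.dropWhile_suffix _
      exact hsub.subset (by simp [hx])
    have hfold : (List.foldl (fun (st : List String × List String) line =>
          if PySem.Str.startswith (PySem.Str.strip line) ":" ||
             PySem.Str.startswith (PySem.Str.strip line) "@inherit"
          then (st.1 ++ [PySem.Str.join " " st.2], [line])
          else (st.1, st.2 ++ [line])) ([], [first]) rest)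
        = List.foldl aStep ([], [first]) rest := rfl
    rw [hfold, pv_phase2 rest hrest]
    simp
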